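-- pv_equiv track=rewrite | github.com/Drakonkinst/AdventOfCode | 2024/Day21/puzzle2.py | break_into_chunks
-- ===== SOURCE A (Python) =====
-- def break_into_chunks(sequence):
--     next_chunk = ""
--     chunks = []
--     for ch in sequence:
--         next_chunk += ch
--         if ch == "A":
--             chunks.append(next_chunk)
--             next_chunk = ""
--     if len(next_chunk):
--         chunks.append(next_chunk)
--     return chunks
-- ===== SOURCE B (Python) =====
-- def break_into_chunks(sequence):
--     seq = list(sequence)
--     boundaries = [i for i, ch in enumerate(seq) if ch == "A"]
--     chunks = []
--     prev = 0
--     for i in boundaries: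
--         chunks.append("".join(seq[prev:i + 1]))
--         prev = i + 1
--     if prev < len(seq):
--         chunks.append("".join(seq[prev:]))
--     return chunks
-- ===== Notes on version B (the rewrite author's own statement) =====
-- stated objective: alternative
-- what changed: Replaces the incremental accumulate-and-emit loop with a two-pass scheme: first collect every boundary index (positions holding the delimiter character), then slice the sequence between consecutive boundaries and join each slice.
import Mathlib
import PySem

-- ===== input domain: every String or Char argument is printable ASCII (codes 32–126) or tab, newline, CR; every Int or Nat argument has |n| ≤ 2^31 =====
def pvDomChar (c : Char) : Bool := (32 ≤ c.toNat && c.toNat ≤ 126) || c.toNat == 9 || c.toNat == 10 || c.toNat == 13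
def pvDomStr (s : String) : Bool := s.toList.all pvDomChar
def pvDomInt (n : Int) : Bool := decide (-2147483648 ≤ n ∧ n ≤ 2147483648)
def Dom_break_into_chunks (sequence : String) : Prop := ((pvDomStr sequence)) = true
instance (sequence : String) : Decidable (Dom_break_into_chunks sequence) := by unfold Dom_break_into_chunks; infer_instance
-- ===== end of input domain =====

-- B replaces A's accumulate-and-emit loop by a two-pass scheme (collect 'A' indices, then slice between boundaries); alternative decomposition, no speed claim.

-- ===== PORT A =====
-- A's loop: next_chunk kept as List Char (Python str built by +=); emitted chunks as String.
def pvChunkA : List Char → List Char → List String → List String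
  | [], next, chunks => if next.length ≠ 0 then chunks ++ [String.ofList next] else chunks
  | c :: rest, next, chunks =>
      let next' := next ++ [c]
      if c = 'A' then pvChunkA rest [] (chunks ++ [String.ofList next'])
      else pvChunkA rest next' chunks

def break_into_chunks (sequence : String) : List String :=
  pvChunkA sequence.toList [] []

-- ===== PORT B =====
-- B's second pass: walk the boundary indices, slicing from prev to i+1 (Python seq[prev:i+1]).
def pvChunkB : List Int → Int → List Char → List String → List String
  | [], prev, seq, chunks =>
      if prev < (seq.length : Int) then chunks ++ [String.ofList (PySem.List.slice seq (some prev) none)]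
      else chunks
  | i :: rest, prev, seq, chunks =>
      pvChunkB rest (i + 1) seq (chunks ++ [String.ofList (PySem.List.slice seq (some prev) (some (i + 1)))])

def break_into_chunks_alt (sequence : String) : List String :=
  let seq := sequence.toList
  let boundaries := (PySem.List.enumerate seq 0).filterMap (fun p => if p.2 = 'A' then some p.1 else none)
  pvChunkB boundaries 0 seq []

-- ===== PRECONDITION & SPEC =====
def Spec_break_into_chunks (sequence : String) (out : List String) : Prop := out = break_into_chunks_alt sequence
instance (sequence : String) (out : List String) : Decidable (Spec_break_into_chunks sequence out) := by unfold Spec_break_into_chunks; infer_instance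

-- ===== CLAIM (what is proved, stated in full; the proofs are below) =====
def Claim_equal_break_into_chunks : Prop := ∀ (sequence : String), Dom_break_into_chunks sequence → Spec_break_into_chunks sequence (break_into_chunks sequence)

-- ===== LEMMAS AND PROOFS =====

-- Nat-indexed view of B's boundary list.
def pvIdxs : List Char → Nat → List Nat
  | [], _ => []
  | c :: r, n => if c = 'A' then n :: pvIdxs r (n + 1) else pvIdxs r (n + 1)

set_option maxRecDepth 4096 in
theorem pvIdxs_enum (l : List Char) : ∀ (n : Nat),
    (PySem.List.enumerate l (n : Int)).filterMap (fun p => if p.2 = 'A' then some p.1 else none)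
      = (pvIdxs l n).map (fun k : Nat => (k : Int)) := by
  induction l with
  | nil => intro n; simp [PySem.List.enumerate_nil, pvIdxs]
  | cons c r ih =>
    intro n
    rw [PySem.List.enumerate_cons, List.filterMap_cons]
    have h1 : ((n : Int) + 1) = ((n + 1 : Nat) : Int) := by omega
    rw [h1, ih (n + 1)]
    by_cases hc : c = 'A'
    · subst hc
      simp only [pvIdxs, reduceIte, List.map_cons]
    · rw [pvIdxs, if_neg hc]
      simp [hc]

theorem pvChunk_eq (l : List Char) : ∀ (pre : List Char) (prev : Nat) (chunks : List String),
    prev ≤ pre.length →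
    pvChunkA l (pre.drop prev) chunks
      = pvChunkB ((pvIdxs l pre.length).map (fun k : Nat => (k : Int))) (prev : Int) (pre ++ l) chunks := by
  induction l with
  | nil =>
    intro pre prev chunks hle
    rw [pvIdxs, List.map_nil, pvChunkA, pvChunkB, List.append_nil]
    rw [PySem.List.slice_from_natCast]
    have hlen : (pre.drop prev).length = pre.length - prev := List.length_drop
    by_cases h : prev < pre.length
    · rw [if_pos (by omega), if_pos (by exact_mod_cast h)]
    · rw [if_neg (by omega), if_neg (by omega)]
  | cons c r ih =>
    intro pre prev chunks hle
    have hdrop : (pre ++ [c] ++ r) = pre ++ c :: r := by simp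
    by_cases hc : c = 'A'
    · subst hc
      simp only [pvIdxs, pvChunkA, pvChunkB, List.map_cons, reduceIte]
      have hcast : ((pre.length : Int) + 1) = ((pre.length + 1 : Nat) : Int) := by omega
      rw [hcast, PySem.List.slice_natCast]
      have hslice : ((pre ++ 'A' :: r).drop prev).take (pre.length + 1 - prev)
          = pre.drop prev ++ ['A'] := by
        rw [List.drop_append_of_le_length hle]
        have h1 : pre.length + 1 - prev = (pre.drop prev).length + 1 := by
          simp [List.length_drop]; omega
        rw [h1, List.take_append]
        simp
      rw [hslice]
      have := ih (pre ++ ['A']) (pre.length + 1) (chunks ++ [String.ofList (pre.drop prev ++ ['A'])]) (by simp)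
      simpa [hdrop, List.drop_append_of_le_length] using this
    · rw [pvIdxs, if_neg hc, pvChunkA]
      simp only [if_neg hc]
      have := ih (pre ++ [c]) prev chunks (by simp; omega)
      rw [List.drop_append_of_le_length hle] at this
      simpa [hdrop] using this

-- ===== VERDICT (by name: the statement is the Claim_ definition above) =====
theorem break_into_chunks_spec : Claim_equal_break_into_chunks := by
  intro s _
  unfold Spec_break_into_chunks break_into_chunks break_into_chunks_alt
  show pvChunkA s.toList [] [] = pvChunkB ((PySem.List.enumerate s.toList ((0 : Nat) : Int)).filterMap
      (fun p => if p.2 = 'A' then some p.1 else none)) ((0 : Nat) : Int) s.toList []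
  rw [pvIdxs_enum s.toList 0]
  have := pvChunk_eq s.toList [] 0 [] (by simp)
  simpa using this
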